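-- pv_equiv track=rewrite | github.com/cms120/Compile_lab | src/syntax_bottom_up/syntax_bottom_up_analysis.py | twoListTodict
-- ===== SOURCE A (Python) =====
-- def twoListTodict(listkey: list, listvalue: list):
--     dictt = {}
--     for i in range(len(listkey)):
--         newlist = []
--         for j in range(len(listvalue[i])):
--             if not j == len(listvalue[i]) - 1:
--                 newlist += listvalue[i][j] + ['|']
--             else:
--                 newlist += listvalue[i][j]
--         listvalue[i] == listvalue[i]
--         dictt[listkey[i]] = newlist
--     return dictt
-- ===== SOURCE B (Python) =====
-- def _glue(groups):
--     # recursive join: separator-carrying recursion on the list structure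
--     if not groups:
--         return []
--     if len(groups) == 1:
--         return list(groups[0])
--     return list(groups[0]) + ['|'] + _glue(groups[1:])
--
--
-- def twoListTodict(listkey: list, listvalue: list):
--     return {key: _glue(groups) for key, groups in zip(listkey, listvalue)}
-- ===== Notes on version B (the rewrite author's own statement) =====
-- stated objective: simpler
-- what changed: Replaces A's two nested index loops with an is-this-the-last-index branch by a dict comprehension over zip(listkey, listvalue) whose values come from a structurally recursive join helper (empty / singleton / head ++ ['|'] ++ recurse on tail), so no indices and no per-iteration last-element test exist at all.
-- outside the precondition, e.g. on twoListTodict(['a'], []): A raises IndexError, B returns {}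
import Mathlib
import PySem

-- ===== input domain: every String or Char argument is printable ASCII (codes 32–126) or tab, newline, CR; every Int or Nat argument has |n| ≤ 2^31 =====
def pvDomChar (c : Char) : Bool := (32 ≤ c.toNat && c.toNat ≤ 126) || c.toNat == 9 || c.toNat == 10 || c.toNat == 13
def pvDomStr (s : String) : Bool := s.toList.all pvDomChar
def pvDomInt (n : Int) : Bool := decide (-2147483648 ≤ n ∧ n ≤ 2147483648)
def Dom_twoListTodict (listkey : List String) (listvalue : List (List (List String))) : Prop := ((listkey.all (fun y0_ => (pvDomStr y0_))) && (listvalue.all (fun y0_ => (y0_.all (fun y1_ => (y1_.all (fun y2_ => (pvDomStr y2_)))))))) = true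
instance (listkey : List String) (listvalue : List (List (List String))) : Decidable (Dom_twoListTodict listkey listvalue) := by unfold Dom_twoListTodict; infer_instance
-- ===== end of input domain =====

-- B replaces A's nested index loops (with a last-index branch) by a dict comprehension over
-- zip whose values come from a structurally recursive join helper (objective: simpler).

-- ===== PORT A =====
-- (`listvalue[i] == listvalue[i]` in A is a bare comparison expression, a no-op: not ported)
def twoListTodict (listkey : List String) (listvalue : List (List (List String))) : List (String × List String) :=
  ((PySem.List.pyRange 0 (listkey.length : Int) 1).foldl (fun dictt i =>
    let lvi := PySem.List.pyGetD listvalue i []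
    let newlist := (PySem.List.pyRange 0 (lvi.length : Int) 1).foldl (fun nl j =>
      if ¬ (j = (lvi.length : Int) - 1) then nl ++ PySem.List.pyGetD lvi j [] ++ ["|"]
      else nl ++ PySem.List.pyGetD lvi j []) ([] : List String)
    dictt.insert (PySem.List.pyGetD listkey i "") newlist)
    (PySem.Dict.empty : PySem.Dict String (List String))).items

-- ===== PORT B =====
-- Source B's _glue: recursion on the list structure (empty / singleton / head ++ ['|'] ++ recurse)
def pvGlue : List (List String) → List String
  | [] => []
  | [g] => g
  | g :: rest => g ++ "|" :: pvGlue rest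

def twoListTodict_alt (listkey : List String) (listvalue : List (List (List String))) : List (String × List String) :=
  ((listkey.zip listvalue).foldl (fun d p => d.insert p.1 (pvGlue p.2))
    (PySem.Dict.empty : PySem.Dict String (List String))).items

-- ===== PRECONDITION & SPEC =====
-- Pre_ excludes exactly the inputs where A raises IndexError: listvalue shorter than listkey.
def Pre_twoListTodict (listkey : List String) (listvalue : List (List (List String))) : Prop :=
  listkey.length ≤ listvalue.length
instance (listkey : List String) (listvalue : List (List (List String))) : Decidable (Pre_twoListTodict listkey listvalue) := by unfold Pre_twoListTodict; infer_instance
def pvWitness_twoListTodict : List String × List (List (List String)) := (["a", "b"], [[["x"], ["y", "z"]], [[]]])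

def Spec_twoListTodict (listkey : List String) (listvalue : List (List (List String))) (out : List (String × List String)) : Prop := out = twoListTodict_alt listkey listvalue
instance (listkey : List String) (listvalue : List (List (List String))) (out : List (String × List String)) : Decidable (Spec_twoListTodict listkey listvalue out) := by unfold Spec_twoListTodict; infer_instance

-- ===== CLAIM (what is proved, stated in full; the proofs are below) =====
def Claim_equal_twoListTodict : Prop := ∀ (listkey : List String) (listvalue : List (List (List String))), Dom_twoListTodict listkey listvalue → Pre_twoListTodict listkey listvalue → Spec_twoListTodict listkey listvalue (twoListTodict listkey listvalue)

-- ===== LEMMAS AND PROOFS =====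

theorem pvGlue_cons_cons (g g' : List String) (t : List (List String)) :
    pvGlue (g :: g' :: t) = g ++ "|" :: pvGlue (g' :: t) := rfl

theorem inner_enum (lv : List (List String)) : ∀ (s L : Int) (acc : List String),
    L = s + (lv.length : Int) - 1 →
    (PySem.List.enumerate lv s).foldl
      (fun nl p => if ¬ (p.1 = L) then nl ++ p.2 ++ ["|"] else nl ++ p.2) acc
    = acc ++ pvGlue lv := by
  induction lv with
  | nil => intro s L acc h; simp [pvGlue]
  | cons g rest ih =>
    intro s L acc h
    rw [PySem.List.enumerate_cons]
    cases rest with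
    | nil =>
      have hs : s = L := by simp at h; omega
      simp [pvGlue, hs]
    | cons g' t =>
      have hne : ¬ (s = L) := by simp at h; omega
      rw [List.foldl_cons]
      simp only [hne, not_false_eq_true, if_pos]
      rw [ih (s + 1) L (acc ++ g ++ ["|"]) (by simp at h ⊢; omega)]
      simp [pvGlue_cons_cons]

theorem innerA_eq (lv : List (List String)) :
    (PySem.List.pyRange 0 (lv.length : Int) 1).foldl (fun nl j =>
      if ¬ (j = (lv.length : Int) - 1) then nl ++ PySem.List.pyGetD lv j [] ++ ["|"]
      else nl ++ PySem.List.pyGetD lv j []) ([] : List String) = pvGlue lv := by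
  have h0 := inner_enum lv 0 ((lv.length : Int) - 1) [] (by omega)
  rw [PySem.List.enumerate_eq_map_pyRange lv ([] : List String), List.foldl_map] at h0
  simpa using h0

theorem outer_zip (lv : List (List (List String))) :
    ∀ (lk : List String) (s : Nat) (d : PySem.Dict String (List String)),
    s + lk.length ≤ lv.length →
    (PySem.List.enumerate lk (s : Int)).foldl
      (fun d p => d.insert p.2 (pvGlue (PySem.List.pyGetD lv p.1 []))) d
    = (lk.zip (lv.drop s)).foldl (fun d q => d.insert q.1 (pvGlue q.2)) d := by
  intro lk
  induction lk with
  | nil => intro s d h; simp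
  | cons k rest ih =>
    intro s d h
    have hs : s < lv.length := by simp at h; omega
    rw [PySem.List.enumerate_cons, List.drop_eq_getElem_cons hs]
    simp only [List.zip_cons_cons, List.foldl_cons]
    have hg : PySem.List.pyGetD lv (s : Int) [] = lv[s] := by
      rw [PySem.List.pyGetD_natCast]; simp [List.getD, hs]
    rw [hg]
    have := ih (s + 1) (d.insert k (pvGlue lv[s])) (by simp at h ⊢; omega)
    rw [show ((s : Int) + 1) = ((s + 1 : Nat) : Int) by push_cast; ring]
    exact this

-- ===== VERDICT (by name: the statement is the Claim_ definition above) =====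
theorem twoListTodict_spec : Claim_equal_twoListTodict := by
  intro lk lv _hdom hpre
  unfold Spec_twoListTodict twoListTodict twoListTodict_alt
  simp only [innerA_eq]
  have ho := outer_zip lv lk 0 PySem.Dict.empty (by simpa using hpre)
  simp only [Nat.cast_zero] at ho
  rw [PySem.List.enumerate_eq_map_pyRange lk ("" : String), List.foldl_map] at ho
  simp only [List.drop_zero] at ho
  refine congrArg PySem.Dict.items ?_
  simpa using ho
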